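-- pv_equiv track=rewrite | github.com/melurke/Snake | visualize_5x5.py | UpdateBoard
-- ===== SOURCE A (Python) =====
-- def UpdateBoard(headPos, applePos, snakePos, board, obstacles, portals): # Update all the fields on the board
--     board = []
--     for y in range(0, 16):
--         for x in range(0, 16):
--             pos = [x, y]
--             if pos in applePos:    content = 1
--             elif pos in obstacles: content = 4
--             elif pos in portals:   content = 5
--             elif pos == headPos:   content = 2
--             elif pos in snakePos:  content = 3
--             else:                  content = 0
--             board.append(content)
--
--     return board
-- ===== SOURCE B (Python) =====
-- def UpdateBoard(headPos, applePos, snakePos, board, obstacles, portals):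
--     # Scatter into a preallocated flat 16*16 zero array: write each source
--     # position at index 16*y+x in increasing priority order (later writes win),
--     # skipping positions outside the grid; no per-cell scanning at all.
--     cells = [0] * 256
--     def write(p, v):
--         if len(p) == 2:
--             x, y = p
--             if 0 <= x < 16 and 0 <= y < 16:
--                 cells[16 * y + x] = v
--     for p in snakePos:
--         write(p, 3)
--     write(headPos, 2)
--     for p in portals:
--         write(p, 5)
--     for p in obstacles:
--         write(p, 4)
--     for p in applePos:
--         write(p, 1)
--     return cells
-- ===== Notes on version B (the rewrite author's own statement) =====
-- stated objective: alternative
-- what changed: Replaces A's per-cell priority if/elif membership chain (scanning every source list for each of the 256 cells) with a scatter into a preallocated flat [0]*256 array: each source position is written once at index 16*y+x in increasing priority order so later writes win, with no per-cell scanning or lookup at all.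
import Mathlib
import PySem

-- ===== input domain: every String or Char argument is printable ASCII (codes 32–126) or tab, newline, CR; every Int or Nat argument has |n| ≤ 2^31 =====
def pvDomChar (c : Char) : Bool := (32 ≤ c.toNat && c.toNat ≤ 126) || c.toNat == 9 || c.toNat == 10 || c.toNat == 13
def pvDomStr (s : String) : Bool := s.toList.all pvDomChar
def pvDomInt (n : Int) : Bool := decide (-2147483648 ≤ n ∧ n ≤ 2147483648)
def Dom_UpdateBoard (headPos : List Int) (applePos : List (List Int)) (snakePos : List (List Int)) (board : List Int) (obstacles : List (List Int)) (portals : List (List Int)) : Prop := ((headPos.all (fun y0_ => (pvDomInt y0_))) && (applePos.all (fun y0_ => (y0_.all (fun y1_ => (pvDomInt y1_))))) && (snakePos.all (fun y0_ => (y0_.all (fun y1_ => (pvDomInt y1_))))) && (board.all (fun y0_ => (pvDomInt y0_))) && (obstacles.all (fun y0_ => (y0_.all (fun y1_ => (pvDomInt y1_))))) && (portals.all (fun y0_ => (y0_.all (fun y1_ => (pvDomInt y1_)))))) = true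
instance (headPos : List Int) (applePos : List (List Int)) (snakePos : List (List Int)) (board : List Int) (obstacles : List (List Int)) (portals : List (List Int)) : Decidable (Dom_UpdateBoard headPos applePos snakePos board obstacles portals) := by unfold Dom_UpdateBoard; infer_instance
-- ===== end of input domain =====

-- B replaces A's per-cell priority if/elif membership chain by a scatter into a preallocated
-- flat 256-cell zero array, writing sources in increasing priority order (objective: alternative).
-- Note: A rebinds its 'board' parameter to []; neither implementation mutates its arguments.

-- ===== PORT A =====
def UpdateBoard (headPos : List Int) (applePos : List (List Int)) (snakePos : List (List Int)) (board : List Int) (obstacles : List (List Int)) (portals : List (List Int)) : List Int :=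
  let board : List Int := []
  (PySem.List.pyRange 0 16 1).foldl (fun acc y =>
    (PySem.List.pyRange 0 16 1).foldl (fun acc x =>
      let pos : List Int := [x, y]
      let content : Int :=
        if pos ∈ applePos then 1
        else if pos ∈ obstacles then 4
        else if pos ∈ portals then 5
        else if pos = headPos then 2
        else if pos ∈ snakePos then 3
        else 0
      acc ++ [content]) acc) board

-- ===== PORT B =====
-- helper of Source B: write value v at flat index 16*y+x if p is an in-grid 2-coordinate
def pvWrite (cells : List Int) (p : List Int) (v : Int) : List Int :=
  match p with
  | [x, y] => if 0 ≤ x ∧ x < 16 ∧ 0 ≤ y ∧ y < 16 then cells.set (16*y+x).toNat v else cells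
  | _ => cells

def UpdateBoard_alt (headPos : List Int) (applePos : List (List Int)) (snakePos : List (List Int)) (board : List Int) (obstacles : List (List Int)) (portals : List (List Int)) : List Int :=
  let cells : List Int := List.replicate 256 0
  let cells := snakePos.foldl (fun cs p => pvWrite cs p 3) cells
  let cells := pvWrite cells headPos 2
  let cells := portals.foldl (fun cs p => pvWrite cs p 5) cells
  let cells := obstacles.foldl (fun cs p => pvWrite cs p 4) cells
  applePos.foldl (fun cs p => pvWrite cs p 1) cells

-- ===== PRECONDITION & SPEC =====
def Spec_UpdateBoard (headPos : List Int) (applePos : List (List Int)) (snakePos : List (List Int)) (board : List Int) (obstacles : List (List Int)) (portals : List (List Int)) (out : List Int) : Prop := out = UpdateBoard_alt headPos applePos snakePos board obstacles portals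
instance (headPos : List Int) (applePos : List (List Int)) (snakePos : List (List Int)) (board : List Int) (obstacles : List (List Int)) (portals : List (List Int)) (out : List Int) : Decidable (Spec_UpdateBoard headPos applePos snakePos board obstacles portals out) := by unfold Spec_UpdateBoard; infer_instance

-- ===== CLAIM (what is proved, stated in full; the proofs are below) =====
def Claim_equal_UpdateBoard : Prop := ∀ (headPos : List Int) (applePos : List (List Int)) (snakePos : List (List Int)) (board : List Int) (obstacles : List (List Int)) (portals : List (List Int)), Dom_UpdateBoard headPos applePos snakePos board obstacles portals → Spec_UpdateBoard headPos applePos snakePos board obstacles portals (UpdateBoard headPos applePos snakePos board obstacles portals)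

-- ===== LEMMAS AND PROOFS =====

-- A's per-cell priority chain, as a function of the coordinates (proof-only helper).
def pvChain (headPos : List Int) (applePos snakePos obstacles portals : List (List Int)) (x y : Int) : Int :=
  if [x, y] ∈ applePos then 1
  else if [x, y] ∈ obstacles then 4
  else if [x, y] ∈ portals then 5
  else if [x, y] = headPos then 2
  else if [x, y] ∈ snakePos then 3
  else 0

theorem length_pvWrite (cs : List Int) (p : List Int) (v : Int) : (pvWrite cs p v).length = cs.length := by
  rcases p with _ | ⟨a, _ | ⟨b, _ | ⟨e, t⟩⟩⟩ <;> simp only [pvWrite] <;> try rfl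
  split <;> simp

theorem length_scatter (L : List (List Int)) (v : Int) (cs : List Int) :
    (L.foldl (fun cs p => pvWrite cs p v) cs).length = cs.length := by
  induction L generalizing cs with
  | nil => rfl
  | cons a L ih => rw [List.foldl_cons, ih, length_pvWrite]

theorem getElem?_pvWrite (cs : List Int) (p : List Int) (v : Int) (x y : Int)
    (hc : cs.length = 256) (hx : 0 ≤ x ∧ x < 16) (hy : 0 ≤ y ∧ y < 16) :
    (pvWrite cs p v)[(16*y+x).toNat]? = if [x, y] = p then some v else (cs[(16*y+x).toNat]?) := by
  have hlt : (16*y+x).toNat < 256 := by omega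
  rcases p with _ | ⟨a, _ | ⟨b, _ | ⟨e, t⟩⟩⟩ <;> simp only [pvWrite]
  · simp
  · simp
  · by_cases hin : 0 ≤ a ∧ a < 16 ∧ 0 ≤ b ∧ b < 16
    · rw [if_pos hin, List.getElem?_set]
      by_cases heq : ([x, y] : List Int) = [a, b]
      · have hab : a = x ∧ b = y := by
          simp only [List.cons.injEq, and_true] at heq
          exact ⟨heq.1.symm, heq.2.symm⟩
        rw [if_pos heq, if_pos (by rw [hab.1, hab.2]), if_pos (by omega)]
      · have hne : ¬(a = x ∧ b = y) := by
          rintro ⟨rfl, rfl⟩; exact heq rfl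
        rw [if_neg heq, if_neg (by omega)]
    · rw [if_neg hin, if_neg (by rintro heq; simp only [List.cons.injEq, and_true] at heq; omega)]
  · simp

theorem getElem?_scatter (L : List (List Int)) (v : Int) (cs : List Int) (x y : Int)
    (hc : cs.length = 256) (hx : 0 ≤ x ∧ x < 16) (hy : 0 ≤ y ∧ y < 16) :
    (L.foldl (fun cs p => pvWrite cs p v) cs)[(16*y+x).toNat]?
      = if [x, y] ∈ L then some v else (cs[(16*y+x).toNat]?) := by
  induction L generalizing cs with
  | nil => simp
  | cons a L ih =>
      rw [List.foldl_cons, ih _ (by rw [length_pvWrite, hc]), getElem?_pvWrite cs a v x y hc hx hy]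
      by_cases h1 : [x, y] ∈ L <;> by_cases h2 : ([x, y] : List Int) = a <;> simp [h1, h2]

theorem length_alt (headPos : List Int) (applePos snakePos : List (List Int)) (board : List Int) (obstacles portals : List (List Int)) :
    (UpdateBoard_alt headPos applePos snakePos board obstacles portals).length = 256 := by
  unfold UpdateBoard_alt
  rw [length_scatter, length_scatter, length_scatter, length_pvWrite, length_scatter,
    List.length_replicate]

theorem getElem?_alt (headPos : List Int) (applePos snakePos : List (List Int)) (board : List Int) (obstacles portals : List (List Int)) (x y : Int)
    (hx : 0 ≤ x ∧ x < 16) (hy : 0 ≤ y ∧ y < 16) :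
    (UpdateBoard_alt headPos applePos snakePos board obstacles portals)[(16*y+x).toNat]?
      = some (pvChain headPos applePos snakePos obstacles portals x y) := by
  have h0 : (List.replicate 256 (0:Int)).length = 256 := List.length_replicate
  have h1 : (snakePos.foldl (fun cs p => pvWrite cs p 3) (List.replicate 256 (0:Int))).length = 256 := by
    rw [length_scatter, h0]
  have h2 : (pvWrite (snakePos.foldl (fun cs p => pvWrite cs p 3) (List.replicate 256 (0:Int))) headPos 2).length = 256 := by
    rw [length_pvWrite, h1]
  have h3 : ((portals.foldl (fun cs p => pvWrite cs p 5) (pvWrite (snakePos.foldl (fun cs p => pvWrite cs p 3) (List.replicate 256 (0:Int))) headPos 2))).length = 256 := by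
    rw [length_scatter, h2]
  have h4 : ((obstacles.foldl (fun cs p => pvWrite cs p 4) (portals.foldl (fun cs p => pvWrite cs p 5) (pvWrite (snakePos.foldl (fun cs p => pvWrite cs p 3) (List.replicate 256 (0:Int))) headPos 2)))).length = 256 := by
    rw [length_scatter, h3]
  have hlt : (16*y+x).toNat < 256 := by omega
  unfold UpdateBoard_alt
  rw [getElem?_scatter _ _ _ x y h4 hx hy, getElem?_scatter _ _ _ x y h3 hx hy,
      getElem?_scatter _ _ _ x y h2 hx hy, getElem?_pvWrite _ _ _ x y h1 hx hy,
      getElem?_scatter _ _ _ x y h0 hx hy, List.getElem?_replicate, if_pos hlt]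
  unfold pvChain
  split_ifs <;> rfl

-- A as a flatten of 16 rows of the per-cell chain
theorem A_eq_flatten (headPos : List Int) (applePos snakePos : List (List Int)) (board : List Int) (obstacles portals : List (List Int)) :
    UpdateBoard headPos applePos snakePos board obstacles portals
      = ((PySem.List.pyRange 0 16 1).map (fun y => (PySem.List.pyRange 0 16 1).map
          (fun x => pvChain headPos applePos snakePos obstacles portals x y))).flatten := by
  unfold UpdateBoard pvChain
  simp only [PySem.List.foldl_append_singleton_eq_map, PySem.List.foldl_append_eq_flatMap,
    List.nil_append, List.flatten_eq_flatMap, List.flatMap_map, id_eq]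

theorem flatten_getElem?_uniform (rows : List (List Int)) (w : Nat) (hw : 0 < w)
    (h : ∀ r ∈ rows, r.length = w) (i : Nat) :
    rows.flatten[i]? = (rows[i / w]?).bind (fun r => r[i % w]?) := by
  induction rows generalizing i with
  | nil => simp
  | cons r rows ih =>
      have hr : r.length = w := h r (by simp)
      by_cases hi : i < w
      · rw [List.flatten_cons, List.getElem?_append_left (by omega),
          Nat.div_eq_of_lt hi, Nat.mod_eq_of_lt hi]
        simp
      · rw [List.flatten_cons, List.getElem?_append_right (by omega),
          ih (fun r hr => h r (by simp [hr])) (i - r.length)]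
        have h1 : i / w = (i - w) / w + 1 := by
          conv_lhs => rw [show i = (i - w) + 1 * w by omega]
          rw [Nat.add_mul_div_right _ _ hw]
        have h2 : i % w = (i - w) % w := by
          conv_lhs => rw [show i = (i - w) + 1 * w by omega]
          rw [Nat.add_mul_mod_self_right]
        rw [hr, h1, h2, List.getElem?_cons_succ]

theorem pyRange16_length : (PySem.List.pyRange 0 16 1).length = 16 := by decide

theorem pyRange16_getElem? (q : Nat) (h : q < 16) :
    (PySem.List.pyRange 0 16 1)[q]? = some (q : Int) := by
  interval_cases q <;> rfl

theorem flatten_rows_length (headPos : List Int) (applePos snakePos obstacles portals : List (List Int)) :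
    (((PySem.List.pyRange 0 16 1).map (fun y => (PySem.List.pyRange 0 16 1).map
        (fun x => pvChain headPos applePos snakePos obstacles portals x y))).flatten).length = 256 := by
  rw [List.length_flatten, List.map_map]
  have : ((PySem.List.pyRange 0 16 1).map
      (List.length ∘ fun y => (PySem.List.pyRange 0 16 1).map
        (fun x => pvChain headPos applePos snakePos obstacles portals x y)))
      = (PySem.List.pyRange 0 16 1).map (fun _ => 16) := by
    apply List.map_congr_left
    intro y _
    simp only [Function.comp_apply, List.length_map]
    exact pyRange16_length
  rw [this]
  decide

-- ===== VERDICT (by name: the statement is the Claim_ definition above) =====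
theorem UpdateBoard_spec : Claim_equal_UpdateBoard := by
  intro headPos applePos snakePos board obstacles portals _
  unfold Spec_UpdateBoard
  rw [A_eq_flatten]
  apply List.ext_getElem?
  intro i
  by_cases hi : i < 256
  · have hq : i / 16 < 16 := by omega
    have hr : i % 16 < 16 := by omega
    rw [flatten_getElem?_uniform _ 16 (by omega)
        (by intro r hrm
            simp only [List.mem_map] at hrm
            obtain ⟨y, _, rfl⟩ := hrm
            rw [List.length_map]
            exact pyRange16_length) i,
        List.getElem?_map, pyRange16_getElem? _ hq]
    simp only [Option.map_some, Option.bind_some]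
    rw [List.getElem?_map, pyRange16_getElem? _ hr]
    have hidx : (16 * ((i / 16 : Nat) : Int) + ((i % 16 : Nat) : Int)).toNat = i := by
      push_cast
      omega
    rw [Option.map_some]
    conv_rhs => rw [← hidx]
    rw [getElem?_alt headPos applePos snakePos board obstacles portals
        ((i % 16 : Nat) : Int) ((i / 16 : Nat) : Int)
        ⟨by positivity, by exact_mod_cast hr⟩ ⟨by positivity, by exact_mod_cast hq⟩]
  · rw [List.getElem?_eq_none, List.getElem?_eq_none]
    · rw [length_alt]; omega
    · rw [flatten_rows_length]; omega
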